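-- pv_equiv track=rewrite | github.com/satheeshgs/training | foobar/commander.py | solution
-- ===== SOURCE A (Python) =====
-- def solution(s):
--     # Your code here
--     index =[]
--     arr = list(s) #creating an array out of the string
--     #finding the indices of the first element for pattern matching
--     for i in range(0,len(s)):
--         if s[i] == s[0]:
--             index.append(i)
--     index.append(len(s))
--     pattern = arr[0:index[1]] #intial pattern for comparison
--
--     i =1
--     length = len(s)
--     while length == len(s) and i<len(index)-1:
--         if pattern == arr[index[i]:index[i+1]]:
--             length = index[i] #appending the length of the index which is repeating
--             pattern = arr[0:index[i+1]]
--         else: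
--             i+=1
--
--     num = int(len(s)/length)
--     return num
-- ===== SOURCE B (Python) =====
-- def solution(s):
--     # Treat the task as substring search: the leading block is s[:m], where m is
--     # the second occurrence of s[0] (or len(s)).  Scan positions left to right
--     # and return len(s)//p at the first p where the leading block reappears with
--     # a block boundary right after it (end of string or another s[0]).
--     n = len(s)
--     c = s[0]
--     m = next((i for i in range(1, n) if s[i] == c), n)
--     block = s[:m]
--     for p in range(1, n - m + 1):
--         if s.startswith(block, p) and (p + m == n or s[p + m] == c):
--             return n // p
--     return 1
-- ===== Notes on version B (the rewrite author's own statement) =====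
-- stated objective: alternative
-- what changed: B abandons A's occurrence-index list, chunk slicing and sentinel-variable while-loop: it determines the leading block s[:m] once and then scans positions directly, returning len(s)//p at the first p where the block reappears (startswith) followed by a block boundary (end of string or another s[0]).
import Mathlib
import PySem

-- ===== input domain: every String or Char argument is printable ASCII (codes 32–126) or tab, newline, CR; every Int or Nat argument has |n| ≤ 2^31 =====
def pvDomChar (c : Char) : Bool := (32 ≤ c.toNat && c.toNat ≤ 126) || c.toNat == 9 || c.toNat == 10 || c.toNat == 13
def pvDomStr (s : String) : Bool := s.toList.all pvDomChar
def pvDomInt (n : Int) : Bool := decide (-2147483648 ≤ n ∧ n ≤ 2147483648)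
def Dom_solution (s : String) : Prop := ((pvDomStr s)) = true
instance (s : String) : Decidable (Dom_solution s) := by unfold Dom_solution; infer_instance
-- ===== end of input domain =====

-- B replaces A's occurrence-index list, chunk slicing and sentinel while-loop by a direct
-- left-to-right substring search for the leading block (objective: alternative algorithm).

-- ===== PORT A =====
-- A's while loop as fuel recursion; the fuel `index.length + 1` always suffices (each
-- iteration increments `i` or moves `length` away from n, which stops the loop), so the
-- fuel-0 branch is unreachable.
def solutionLoopA (arr : List Char) (index : List Int) (n : Int) :
    Nat → Int → Int → List Char → Int
  | 0, _, length, _ => PySem.Int.floordiv n length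
  | fuel+1, i, length, pattern =>
    if length = n ∧ i < (index.length : Int) - 1 then
      if pattern = PySem.List.slice arr (some (PySem.List.pyGetD index i 0))
          (some (PySem.List.pyGetD index (i+1) 0)) then
        solutionLoopA arr index n fuel i (PySem.List.pyGetD index i 0)
          (PySem.List.slice arr (some 0) (some (PySem.List.pyGetD index (i+1) 0)))
      else solutionLoopA arr index n fuel (i+1) length pattern
    else PySem.Int.floordiv n length

def solution (s : String) : Int :=
  let arr := s.toList
  let n : Int := PySem.Str.len s
  let index : List Int :=
    (PySem.List.pyRange 0 n 1).foldl
      (fun acc i => if PySem.Str.pyGet? s i = PySem.Str.pyGet? s 0 then acc ++ [i] else acc) []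
  let index := index ++ [n]
  -- index[1] exists for every nonempty s (Pre_); pyGetD's default is never read there.
  let pattern := PySem.List.slice arr (some 0) (some (PySem.List.pyGetD index 1 0))
  -- `int(len(s)/length)` is ported as floor division, exact for the positive operands
  -- that occur here; the division sits at the loop's exit points inside solutionLoopA.
  solutionLoopA arr index n (index.length + 1) 1 n pattern

-- ===== PORT B =====
-- Source B's for-loop over range(1, n - m + 1) with early return.
def solBLoop (cs : List Char) (c : Char) (n m : Int) (block : List Char) : List Int → Int
  | [] => 1
  | p :: ps =>
    -- s.startswith(block, p) is ported as startswith on s[p:], exact for 0 ≤ p ≤ len(s)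
    if PySem.Chars.startswith (cs.drop p.toNat) block ∧
        (p + m = n ∨ PySem.List.pyGet? cs (p + m) = some c)
    then PySem.Int.floordiv n p
    else solBLoop cs c n m block ps

def solution_alt (s : String) : Int :=
  match s.toList with
  | [] => 0  -- c = s[0] raises IndexError in Python; excluded by Pre_solution
  | c :: _ =>
    let n : Int := PySem.Str.len s
    -- m = next((i for i in range(1, n) if s[i] == c), n)
    let m : Int := ((PySem.List.pyRange 1 n 1).find?
        (fun i => PySem.Str.pyGet? s i == some c)).getD n
    let block := PySem.List.slice s.toList none (some m)   -- block = s[:m]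
    solBLoop s.toList c n m block (PySem.List.pyRange 1 (n - m + 1) 1)

-- ===== PRECONDITION & SPEC =====
-- Pre_ excludes only the empty string, on which A raises IndexError (index[1]).
def Pre_solution (s : String) : Prop := s.toList ≠ []
instance (s : String) : Decidable (Pre_solution s) := by unfold Pre_solution; infer_instance
def pvWitness_solution : String := "abab"

def Spec_solution (s : String) (out : Int) : Prop := out = solution_alt s
instance (s : String) (out : Int) : Decidable (Spec_solution s out) := by unfold Spec_solution; infer_instance

-- ===== CLAIM (what is proved, stated in full; the proofs are below) =====
def Claim_equal_solution : Prop := ∀ (s : String), Dom_solution s → Pre_solution s → Spec_solution s (solution s)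

-- ===== LEMMAS AND PROOFS =====

-- Occurrence test for the first character, the length of the leading block, the block,
-- and B's hit predicate, all as functions of the character list.
def occB (cs : List Char) (c : Char) : Nat → Bool := fun j => decide (cs[j]? = some c)

def mOf (cs : List Char) (c : Char) : Nat :=
  ((List.range' 1 (cs.length - 1)).find? (occB cs c)).getD cs.length

def blockOf (cs : List Char) (c : Char) : List Char := cs.take (mOf cs c)

def Pb (cs : List Char) (c : Char) : Nat → Bool := fun p =>
  decide ((cs.drop p).take (mOf cs c) = blockOf cs c) &&
    (decide (p + mOf cs c = cs.length) || decide (cs[p + mOf cs c]? = some c))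

-- A's chunk scan over the occurrence positions (with sentinel n for the last chunk end).
def aScan (cs : List Char) (c : Char) : List Nat → Int
  | [] => PySem.Int.floordiv (cs.length : Int) (cs.length : Int)
  | q :: qs =>
    if blockOf cs c = (cs.drop q).take (qs.headD cs.length - q)
    then PySem.Int.floordiv (cs.length : Int) (q : Int) else aScan cs c qs

-- B's position scan as "first hit of Pb".
def firstHit (cs : List Char) (c : Char) (l : List Nat) : Int :=
  match l.find? (Pb cs c) with
  | some p => PySem.Int.floordiv (cs.length : Int) (p : Int)
  | none => 1

theorem getD_append_length {xs ys : List Int} (y d : Int) :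
    (xs ++ y :: ys).getD xs.length d = y := by
  induction xs with
  | nil => simp
  | cons x xs ih => simp only [List.cons_append, List.length_cons, List.getD_cons_succ]; exact ih

-- find? over a range with default "one past the end": the found value is the least
-- element of the range satisfying f (or the default, past everything).
theorem nextFacts (f : Nat → Bool) : ∀ (b a q : Nat),
    ((List.range' a b).find? f).getD (a + b) = q →
    a ≤ q ∧ q ≤ a + b ∧ (∀ j, a ≤ j → j < q → f j = false) ∧ (q = a + b ∨ f q = true) := by
  intro b
  induction b with
  | zero =>
    intro a q hq
    simp [List.range'] at hq
    subst hq
    exact ⟨le_rfl, by omega, fun j h1 h2 => absurd h1 (by omega), Or.inl (by omega)⟩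
  | succ b ih =>
    intro a q hq
    rw [List.range'_succ, List.find?_cons] at hq
    cases hfa : f a with
    | true =>
      rw [hfa] at hq
      simp at hq
      subst hq
      exact ⟨le_rfl, by omega, fun j h1 h2 => absurd h1 (by omega), Or.inr hfa⟩
    | false =>
      rw [hfa] at hq
      simp only at hq
      have hq' : ((List.range' (a+1) b).find? f).getD ((a+1) + b) = q := by
        rw [show (a+1) + b = a + (b+1) from by omega]; exact hq
      obtain ⟨h1, h2, h3, h4⟩ := ih (a+1) q hq'
      refine ⟨by omega, by omega, ?_, ?_⟩
      · intro j hj1 hj2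
        rcases Nat.eq_or_lt_of_le hj1 with rfl | hlt
        · exact hfa
        · exact h3 j (by omega) hj2
      · rcases h4 with h | h
        · exact Or.inl (by omega)
        · exact Or.inr h

theorem mOf_facts (cs : List Char) (c : Char) (h0 : cs[0]? = some c) :
    1 ≤ mOf cs c ∧ mOf cs c ≤ cs.length ∧
    (∀ j, 1 ≤ j → j < mOf cs c → occB cs c j = false) ∧
    (mOf cs c = cs.length ∨ occB cs c (mOf cs c) = true) := by
  have hn : 1 ≤ cs.length := by
    cases cs with
    | nil => simp at h0
    | cons a t => simp
  have h := nextFacts (occB cs c) (cs.length - 1) 1 (mOf cs c)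
    (by rw [mOf, show 1 + (cs.length - 1) = cs.length from by omega])
  rw [show 1 + (cs.length - 1) = cs.length from by omega] at h
  exact h

theorem blockOf_length (cs : List Char) (c : Char) (h0 : cs[0]? = some c) :
    (blockOf cs c).length = mOf cs c := by
  obtain ⟨h1, h2, _, _⟩ := mOf_facts cs c h0
  simp [blockOf]
  omega

theorem Pb_occ (cs : List Char) (c : Char) (h0 : cs[0]? = some c) (p : Nat)
    (h : Pb cs c p = true) : cs[p]? = some c := by
  obtain ⟨h1, h2, _, _⟩ := mOf_facts cs c h0
  rw [Pb, Bool.and_eq_true] at h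
  have htake : (cs.drop p).take (mOf cs c) = blockOf cs c := by
    have := h.1; simpa using this
  have hhead : ((cs.drop p).take (mOf cs c))[0]? = (blockOf cs c)[0]? := by rw [htake]
  rw [List.getElem?_take_of_lt (by omega), List.getElem?_drop, Nat.add_zero] at hhead
  rw [blockOf, List.getElem?_take_of_lt (by omega)] at hhead
  rw [hhead, h0]

theorem Pb_le (cs : List Char) (c : Char) (h0 : cs[0]? = some c) (p : Nat)
    (h : Pb cs c p = true) : p + mOf cs c ≤ cs.length := by
  obtain ⟨h1, h2, _, _⟩ := mOf_facts cs c h0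
  rw [Pb, Bool.and_eq_true] at h
  have htake : (cs.drop p).take (mOf cs c) = blockOf cs c := by
    have := h.1; simpa using this
  have hl := congrArg List.length htake
  rw [List.length_take, List.length_drop, blockOf_length cs c h0] at hl
  omega

-- A's chunk (from an occurrence p to the next occurrence q', or n) equals the block
-- exactly when Pb holds at p.
theorem chunk_iff (cs : List Char) (c : Char) (p q' : Nat)
    (h0 : cs[0]? = some c)
    (hpn : p < cs.length)
    (hq1 : p < q') (hq2 : q' ≤ cs.length)
    (hq3 : ∀ j, p < j → j < q' → occB cs c j = false)
    (hq4 : q' = cs.length ∨ occB cs c q' = true) :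
    (blockOf cs c = (cs.drop p).take (q' - p)) ↔ Pb cs c p = true := by
  obtain ⟨hm1, hmn, hmpre, hmend⟩ := mOf_facts cs c h0
  set m := mOf cs c with hm
  constructor
  · intro h
    have hl := congrArg List.length h
    rw [blockOf_length cs c h0, List.length_take, List.length_drop] at hl
    have hqm : q' = p + m := by omega
    rw [Pb, Bool.and_eq_true]
    constructor
    · rw [← hm]
      have : (cs.drop p).take m = blockOf cs c := by rw [h, hqm]; congr 1; omega
      simpa using this
    · rw [Bool.or_eq_true]
      rcases hq4 with h4 | h4
      · exact Or.inl (by simp [← hm]; omega)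
      · rw [occB] at h4
        exact Or.inr (by rw [← hm, ← hqm]; simpa using h4)
  · intro h
    rw [Pb, Bool.and_eq_true] at h
    have htake : (cs.drop p).take m = blockOf cs c := by have := h.1; simpa [← hm] using this
    have hbd : p + m = cs.length ∨ cs[p + m]? = some c := by
      have := h.2; rw [Bool.or_eq_true] at this
      rcases this with h' | h'
      · exact Or.inl (by simpa [← hm] using h')
      · exact Or.inr (by simpa [← hm] using h')
    have hl := congrArg List.length htake
    rw [List.length_take, List.length_drop, blockOf_length cs c h0, ← hm] at hl
    have hpm : p + m ≤ cs.length := by omega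
    have hno : ∀ j, p < j → j < p + m → occB cs c j = false := by
      intro j hj1 hj2
      have hi1 : 1 ≤ j - p := by omega
      have hi2 : j - p < m := by omega
      have hcj : cs[j]? = cs[j - p]? := by
        have e1 : cs[j]? = ((cs.drop p).take m)[j - p]? := by
          rw [List.getElem?_take_of_lt hi2, List.getElem?_drop]
          congr 1; omega
        have e2 : (blockOf cs c)[j - p]? = cs[j - p]? := by
          rw [blockOf, ← hm, List.getElem?_take_of_lt hi2]
        rw [e1, htake, e2]
      have := hmpre (j - p) hi1 hi2
      rw [occB, decide_eq_false_iff_not] at this ⊢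
      rw [hcj]; exact this
    have hge : p + m ≤ q' := by
      by_contra hc
      push Not at hc
      rcases hq4 with h4 | h4
      · omega
      · have := hno q' hq1 hc
        rw [this] at h4; exact absurd h4 (by simp)
    have hle : q' ≤ p + m := by
      rcases hbd with h4 | h4
      · omega
      · by_contra hc
        push Not at hc
        have := hq3 (p + m) (by omega) hc
        rw [occB, decide_eq_false_iff_not] at this
        exact this h4
    have hqm : q' = p + m := by omega
    rw [hqm, show p + m - p = m from by omega, htake]

-- The chunk scan over the occurrences in [lo, n) equals the position scan over [lo, n).
theorem scan_eq (cs : List Char) (c : Char) (h0 : cs[0]? = some c) :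
    ∀ (k lo : Nat), 1 ≤ lo → lo + k = cs.length →
    aScan cs c ((List.range' lo k).filter (occB cs c)) = firstHit cs c (List.range' lo k) := by
  intro k
  induction k with
  | zero =>
    intro lo hlo hln
    have hn : cs.length ≠ 0 := by omega
    show aScan cs c ((List.range' lo 0).filter (occB cs c)) = firstHit cs c (List.range' lo 0)
    rw [List.range'_zero, List.filter_nil, aScan, firstHit]
    rw [show ((cs.length : Int)) = ((cs.length : Nat) : Int) from rfl,
      PySem.Int.floordiv_natCast, Nat.div_self (by omega)]
    rfl
  | succ k ih =>
    intro lo hlo hln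
    rw [List.range'_succ]
    cases hflo : occB cs c lo with
    | false =>
      have hPb : Pb cs c lo = false := by
        cases hPb : Pb cs c lo with
        | false => rfl
        | true =>
          have := Pb_occ cs c h0 lo hPb
          rw [occB, decide_eq_false_iff_not] at hflo
          exact absurd this hflo
      rw [List.filter_cons_of_neg (by rw [hflo]; simp), firstHit, List.find?_cons, hPb]
      exact ih (lo + 1) (by omega) (by omega)
    | true =>
      rw [List.filter_cons_of_pos hflo]
      set q' := ((List.range' (lo+1) k).find? (occB cs c)).getD cs.length with hq'def
      have hhead : ((List.range' (lo+1) k).filter (occB cs c)).headD cs.length = q' := by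
        rw [hq'def, ← List.head?_filter, List.headD_eq_head?_getD]
      obtain ⟨hg1, hg2, hg3, hg4⟩ := nextFacts (occB cs c) k (lo+1) q'
        (by rw [show (lo+1) + k = cs.length from by omega])
      rw [show (lo+1) + k = cs.length from by omega] at hg2 hg4
      have hiff := chunk_iff cs c lo q' h0 (by omega) (by omega) hg2
        (fun j hj1 hj2 => hg3 j (by omega) hj2) hg4
      rw [aScan, hhead, firstHit, List.find?_cons]
      cases hPb : Pb cs c lo with
      | true =>
        rw [if_pos (hiff.mpr hPb)]
      | false =>
        rw [if_neg (fun hch => by rw [hiff.mp hch] at hPb; exact absurd hPb (by simp))]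
        exact ih (lo + 1) (by omega) (by omega)

-- A's fueled while-loop, started at i = frontI.length on index = frontI ++ qs ++ [n],
-- is the chunk scan over qs.
theorem loopA_eq (cs : List Char) (c : Char) :
    ∀ (qs : List Nat) (frontI : List Int) (fuel : Nat),
    qs.length + 1 ≤ fuel →
    (∀ q ∈ qs, q < cs.length) →
    solutionLoopA cs (frontI ++ (qs.map (fun q : Nat => (q : Int)) ++ [(cs.length : Int)]))
        (cs.length : Int) fuel (frontI.length : Int) (cs.length : Int) (blockOf cs c)
      = aScan cs c qs := by
  intro qs
  induction qs with
  | nil =>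
    intro frontI fuel hfuel _
    obtain ⟨f, rfl⟩ : ∃ f, fuel = f + 1 := ⟨fuel - 1, by omega⟩
    rw [solutionLoopA, if_neg, aScan]
    intro hcontra
    obtain ⟨_, hlt⟩ := hcontra
    have hL : (frontI ++ (([] : List Nat).map (fun q : Nat => (q : Int)) ++ [(cs.length : Int)])).length
        = frontI.length + 1 := by simp
    rw [hL] at hlt
    push_cast at hlt
    omega
  | cons q qs' ih =>
    intro frontI fuel hfuel hbound
    simp only [List.length_cons] at hfuel
    obtain ⟨f, rfl⟩ : ∃ f, fuel = f + 1 := ⟨fuel - 1, by omega⟩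
    have hq : q < cs.length := hbound q (by simp)
    have hidx : frontI ++ ((q :: qs').map (fun q : Nat => (q : Int)) ++ [(cs.length : Int)])
        = frontI ++ (q : Int) :: (qs'.map (fun q : Nat => (q : Int)) ++ [(cs.length : Int)]) := by
      simp
    have hget1 : PySem.List.pyGetD
        (frontI ++ ((q :: qs').map (fun q : Nat => (q : Int)) ++ [(cs.length : Int)]))
        (frontI.length : Int) 0 = (q : Int) := by
      rw [hidx, PySem.List.pyGetD_natCast, getD_append_length]
    have hget2 : PySem.List.pyGetD
        (frontI ++ ((q :: qs').map (fun q : Nat => (q : Int)) ++ [(cs.length : Int)]))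
        ((frontI.length : Int) + 1) 0 = ((qs'.headD cs.length : Nat) : Int) := by
      rw [show ((frontI.length : Int) + 1) = ((frontI.length + 1 : Nat) : Int) from by push_cast; ring,
        PySem.List.pyGetD_natCast]
      cases qs' with
      | nil =>
        rw [show frontI ++ ((q :: ([] : List Nat)).map (fun q : Nat => (q : Int)) ++ [(cs.length : Int)])
            = (frontI ++ [(q : Int)]) ++ (cs.length : Int) :: [] from by simp,
          show frontI.length + 1 = (frontI ++ [(q : Int)]).length from by simp,
          getD_append_length]
        simp
      | cons r rs =>
        rw [show frontI ++ ((q :: r :: rs).map (fun q : Nat => (q : Int)) ++ [(cs.length : Int)])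
            = (frontI ++ [(q : Int)]) ++ (r : Int) :: (rs.map (fun q : Nat => (q : Int)) ++ [(cs.length : Int)]) from by simp,
          show frontI.length + 1 = (frontI ++ [(q : Int)]).length from by simp,
          getD_append_length]
        simp
    have hslice : PySem.List.slice cs (some ((q : Nat) : Int))
        (some (((qs'.headD cs.length : Nat) : Int))) = (cs.drop q).take (qs'.headD cs.length - q) := by
      rw [PySem.List.slice_natCast]
    rw [solutionLoopA]
    rw [if_pos (by
      refine ⟨rfl, ?_⟩
      have hL : (frontI ++ ((q :: qs').map (fun q : Nat => (q : Int)) ++ [(cs.length : Int)])).length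
          = frontI.length + (qs'.length + 2) := by simp
      rw [hL]
      push_cast
      omega)]
    rw [hget1, hget2, hslice, aScan]
    by_cases hch : blockOf cs c = (cs.drop q).take (qs'.headD cs.length - q)
    · rw [if_pos hch, if_pos hch]
      obtain ⟨f2, rfl⟩ : ∃ f2, f = f2 + 1 := ⟨f - 1, by omega⟩
      rw [solutionLoopA]
      rw [if_neg (by
        intro hcontra
        obtain ⟨hpn, _⟩ := hcontra
        have : ((q : Nat) : Int) = ((cs.length : Nat) : Int) := hpn
        have := Nat.cast_injective this
        omega)]
    · rw [if_neg hch, if_neg hch]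
      have hrec := ih (frontI ++ [(q : Int)]) f (by omega) (fun r hr => hbound r (by simp [hr]))
      rw [hidx, show frontI ++ (q : Int) :: (qs'.map (fun q : Nat => (q : Int)) ++ [(cs.length : Int)])
        = (frontI ++ [(q : Int)]) ++ (qs'.map (fun q : Nat => (q : Int)) ++ [(cs.length : Int)])
        from by simp]
      rw [show ((frontI.length : Int) + 1) = (((frontI ++ [(q : Int)]).length : Nat) : Int) from by
        simp]
      exact hrec

-- B's loop is the first hit of Pb.
theorem solBLoop_eq (cs : List Char) (c : Char) (h0 : cs[0]? = some c) :
    ∀ (l : List Nat),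
    solBLoop cs c (cs.length : Int) (mOf cs c : Int) (blockOf cs c)
        (l.map (fun q : Nat => (q : Int)))
      = firstHit cs c l := by
  intro l
  induction l with
  | nil => rfl
  | cons p ps ih =>
    have hstep : firstHit cs c (p :: ps)
        = if Pb cs c p = true then PySem.Int.floordiv (cs.length : Int) (p : Int)
          else firstHit cs c ps := by
      rw [firstHit, List.find?_cons]
      cases hPb : Pb cs c p with
      | true => simp
      | false => simp [firstHit]
    have hcond : (PySem.Chars.startswith (cs.drop ((p : Int)).toNat) (blockOf cs c) ∧
        ((p : Int) + ((mOf cs c : Nat) : Int) = ((cs.length : Nat) : Int) ∨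
          PySem.List.pyGet? cs ((p : Int) + ((mOf cs c : Nat) : Int)) = some c)) ↔ Pb cs c p = true := by
      rw [Pb, Bool.and_eq_true, Bool.or_eq_true, decide_eq_true_eq, decide_eq_true_eq,
        decide_eq_true_eq]
      have htn : ((p : Int)).toNat = p := Int.toNat_natCast p
      have hsw : PySem.Chars.startswith (cs.drop p) (blockOf cs c) = true
          ↔ (cs.drop p).take (mOf cs c) = blockOf cs c := by
        rw [PySem.Chars.startswith_iff, List.prefix_iff_eq_take, blockOf_length cs c h0]
        exact ⟨fun h => h.symm, fun h => h.symm⟩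
      have hcast : ((p : Int) + ((mOf cs c : Nat) : Int)) = ((p + mOf cs c : Nat) : Int) := by
        push_cast; ring
      rw [htn, hcast, PySem.List.pyGet?_natCast]
      constructor
      · rintro ⟨hs, hb⟩
        refine ⟨hsw.mp hs, ?_⟩
        rcases hb with hb | hb
        · exact Or.inl (by exact_mod_cast hb)
        · exact Or.inr hb
      · rintro ⟨hs, hb⟩
        refine ⟨hsw.mpr hs, ?_⟩
        rcases hb with hb | hb
        · exact Or.inl (by exact_mod_cast hb)
        · exact Or.inr hb
    rw [List.map_cons, solBLoop, hstep]
    by_cases hPb : Pb cs c p = true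
    · rw [if_pos (hcond.mpr hPb), if_pos hPb]
    · rw [if_neg (fun hc => hPb (hcond.mp hc)), if_neg hPb, ih]

-- Positions past n - m cannot hit (the block no longer fits), so B's shorter scan
-- agrees with the full one.
theorem firstHit_ext (cs : List Char) (c : Char) (h0 : cs[0]? = some c) :
    firstHit cs c (List.range' 1 (cs.length - 1))
      = firstHit cs c (List.range' 1 (cs.length - mOf cs c)) := by
  obtain ⟨hm1, hmn, _, _⟩ := mOf_facts cs c h0
  have hsplit : List.range' 1 (cs.length - 1)
      = List.range' 1 (cs.length - mOf cs c)
        ++ List.range' (1 + (cs.length - mOf cs c)) (mOf cs c - 1) := by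
    have h := List.range'_append (s := 1) (m := cs.length - mOf cs c) (n := mOf cs c - 1)
      (step := 1)
    rw [Nat.one_mul] at h
    rw [show cs.length - 1 = (cs.length - mOf cs c) + (mOf cs c - 1) from by omega]
    exact h.symm
  have hnone : (List.range' (1 + (cs.length - mOf cs c)) (mOf cs c - 1)).find? (Pb cs c)
      = none := by
    rw [List.find?_eq_none]
    intro p hp hPb
    have hmem := List.mem_range'_1.mp hp
    have := Pb_le cs c h0 p hPb
    omega
  rw [firstHit, firstHit, hsplit, List.find?_append, hnone, Option.or_none]

theorem solution_eq_aScan (s : String) (c : Char) (rest : List Char)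
    (hcs : s.toList = c :: rest) :
    solution s = aScan s.toList c ((List.range' 1 (s.toList.length - 1)).filter (occB s.toList c)) := by
  have h0 : s.toList[0]? = some c := by rw [hcs]; rfl
  have h0' : PySem.Str.pyGet? s 0 = some c := by
    rw [show (0 : Int) = ((0 : Nat) : Int) from rfl, PySem.Str.pyGet?_natCast, h0]
  have hn : 1 ≤ s.toList.length := by rw [hcs]; simp
  simp only [solution]
  rw [PySem.Str.len_eq]
  have hbody : (fun (acc : List Int) (i : Int) =>
        if PySem.Str.pyGet? s i = PySem.Str.pyGet? s 0 then acc ++ [i] else acc)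
      = (fun (acc : List Int) (i : Int) =>
        if decide (PySem.Str.pyGet? s i = some c) = true then acc ++ [i] else acc) := by
    funext acc i
    rw [h0']
    simp
  rw [hbody, PySem.List.pyRange_zero_nat]
  rw [show (((List.range s.toList.length).map (fun k : Nat => (k : Int))).foldl
        (fun (acc : List Int) (i : Int) =>
          if decide (PySem.Str.pyGet? s i = some c) = true then acc ++ [i] else acc) [])
      = [] ++ List.map (fun x : Int => x)
          (List.filter (fun j : Int => decide (PySem.Str.pyGet? s j = some c))
            ((List.range s.toList.length).map (fun k : Nat => (k : Int)))) from
    PySem.List.foldl_append_if (fun j : Int => decide (PySem.Str.pyGet? s j = some c))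
      (fun x : Int => x) _ []]
  rw [List.nil_append, List.map_id', List.filter_map]
  have hcomp : ((fun j : Int => decide (PySem.Str.pyGet? s j = some c))
        ∘ (fun k : Nat => (k : Int))) = occB s.toList c := by
    funext j
    simp [occB, Function.comp]
  rw [hcomp]
  have hrange : List.range s.toList.length = 0 :: List.range' 1 (s.toList.length - 1) := by
    rw [List.range_eq_range']
    conv_lhs => rw [show s.toList.length = (s.toList.length - 1) + 1 from by omega]
    rw [List.range'_succ]
  rw [hrange, List.filter_cons_of_pos (by simp [occB, h0]), List.map_cons, List.cons_append]
  have hbound : ∀ q ∈ (List.range' 1 (s.toList.length - 1)).filter (occB s.toList c),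
      q < s.toList.length := by
    intro q hq
    have := List.mem_range'_1.mp (List.mem_of_mem_filter hq)
    omega
  have hm' : PySem.List.pyGetD
      (((0 : Nat) : Int) ::
        (((List.range' 1 (s.toList.length - 1)).filter (occB s.toList c)).map
            (fun k : Nat => (k : Int)) ++ [((s.toList.length : Nat) : Int)])) 1 0
      = ((mOf s.toList c : Nat) : Int) := by
    have hfind : (List.range' 1 (s.toList.length - 1)).find? (occB s.toList c)
        = ((List.range' 1 (s.toList.length - 1)).filter (occB s.toList c)).head? :=
      (List.head?_filter).symm
    rw [PySem.List.pyGetD_ofNat', mOf, hfind]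
    cases (List.range' 1 (s.toList.length - 1)).filter (occB s.toList c) with
    | nil => rfl
    | cons a t => rfl
  rw [hm']
  have hpat : PySem.List.slice s.toList (some 0) (some ((mOf s.toList c : Nat) : Int))
      = blockOf s.toList c := by
    rw [show (0 : Int) = ((0 : Nat) : Int) from rfl, PySem.List.slice_natCast]
    simp [blockOf]
  rw [hpat]
  rw [show (((0 : Nat) : Int) ::
      (((List.range' 1 (s.toList.length - 1)).filter (occB s.toList c)).map
          (fun k : Nat => (k : Int)) ++ [((s.toList.length : Nat) : Int)]))
    = [((0 : Nat) : Int)] ++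
      (((List.range' 1 (s.toList.length - 1)).filter (occB s.toList c)).map
          (fun q : Nat => (q : Int)) ++ [((s.toList.length : Nat) : Int)]) from rfl]
  exact loopA_eq s.toList c ((List.range' 1 (s.toList.length - 1)).filter (occB s.toList c))
    [((0 : Nat) : Int)]
    (([((0 : Nat) : Int)] ++
        (((List.range' 1 (s.toList.length - 1)).filter (occB s.toList c)).map
            (fun q : Nat => (q : Int)) ++ [((s.toList.length : Nat) : Int)])).length + 1)
    (by simp) hbound

theorem solution_alt_eq_firstHit (s : String) (c : Char) (rest : List Char)
    (hcs : s.toList = c :: rest) :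
    solution_alt s = firstHit s.toList c (List.range' 1 (s.toList.length - mOf s.toList c)) := by
  have h0 : s.toList[0]? = some c := by rw [hcs]; rfl
  have hn : 1 ≤ s.toList.length := by rw [hcs]; simp
  obtain ⟨hm1, hmn, _, _⟩ := mOf_facts s.toList c h0
  rw [solution_alt.eq_def, hcs]
  simp only [PySem.Str.len_eq]
  rw [← hcs]
  have hRange1 : PySem.List.pyRange 1 ((s.toList.length : Nat) : Int) 1
      = (List.range' 1 (s.toList.length - 1)).map (fun k : Nat => (k : Int)) := by
    rw [PySem.List.pyRange_one,
      show (((s.toList.length : Nat) : Int) - 1).toNat = s.toList.length - 1 from by omega,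
      List.range'_eq_map_range, List.map_map]
    exact List.map_congr_left fun k _ => by simp
  have hcomp2 : ((fun i : Int => PySem.Str.pyGet? s i == some c)
        ∘ (fun k : Nat => (k : Int))) = occB s.toList c := by
    funext j
    simp only [Function.comp_apply, PySem.Str.pyGet?_natCast, occB]
    by_cases h : s.toList[j]? = some c <;> simp [h]
  have hmInt : ((PySem.List.pyRange 1 ((s.toList.length : Nat) : Int) 1).find?
        (fun i => PySem.Str.pyGet? s i == some c)).getD ((s.toList.length : Nat) : Int)
      = ((mOf s.toList c : Nat) : Int) := by
    rw [hRange1, List.find?_map, hcomp2]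
    cases hf : (List.range' 1 (s.toList.length - 1)).find? (occB s.toList c) with
    | none => rw [mOf, hf]; simp
    | some a => rw [mOf, hf]; simp
  rw [hmInt]
  have hblock : PySem.List.slice s.toList none (some ((mOf s.toList c : Nat) : Int))
      = blockOf s.toList c := by
    rw [PySem.List.slice_to_natCast, blockOf]
  rw [hblock]
  have hRange2 : PySem.List.pyRange 1
        (((s.toList.length : Nat) : Int) - ((mOf s.toList c : Nat) : Int) + 1) 1
      = (List.range' 1 (s.toList.length - mOf s.toList c)).map (fun q : Nat => (q : Int)) := by
    rw [PySem.List.pyRange_one,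
      show ((((s.toList.length : Nat) : Int) - ((mOf s.toList c : Nat) : Int) + 1) - 1).toNat
        = s.toList.length - mOf s.toList c from by omega,
      List.range'_eq_map_range, List.map_map]
    exact List.map_congr_left fun k _ => by simp
  rw [hRange2]
  exact solBLoop_eq s.toList c h0 (List.range' 1 (s.toList.length - mOf s.toList c))

-- ===== VERDICT (by name: the statement is the Claim_ definition above) =====
theorem solution_spec : Claim_equal_solution := by
  unfold Claim_equal_solution
  intro s _ hpre
  unfold Spec_solution
  cases hcs : s.toList with
  | nil => exact absurd hcs hpre
  | cons c rest =>
    have h0 : s.toList[0]? = some c := by rw [hcs]; rfl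
    have hn : 1 ≤ s.toList.length := by rw [hcs]; simp
    rw [solution_eq_aScan s c rest hcs,
      scan_eq s.toList c h0 (s.toList.length - 1) 1 le_rfl (by omega),
      firstHit_ext s.toList c h0,
      ← solution_alt_eq_firstHit s c rest hcs]
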